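-- pv_equiv track=rewrite | github.com/iam-rajesh-patnala/Programming-Foundations | 12__Dictionaries/Coding Practice - 29/List of Unique Tuples.py | tracing_duplicate
-- ===== SOURCE A (Python) =====
-- def tracing_duplicate(total_list):
--     length = len(total_list)
--     new_list = []
--
--     for i in range(length):
--         nested_list_length = len(total_list[i])
--         conv_list = list(set(total_list[i]))
--         conv_list.sort()
--         conv_list_length = len(conv_list)
--
--         if conv_list_length == nested_list_length:
--             new_list.append(conv_list)
--
--     return new_list
-- ===== SOURCE B (Python) =====
-- def _has_adjacent_dup(s):
--     if len(s) < 2: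
--         return False
--     if s[0] == s[1]:
--         return True
--     return _has_adjacent_dup(s[1:])
--
--
-- def tracing_duplicate(total_list):
--     result = []
--     for sub in total_list:
--         s = sorted(sub)
--         if not _has_adjacent_dup(s):
--             result.append(s)
--     return result
-- ===== Notes on version B (the rewrite author's own statement) =====
-- stated objective: alternative
-- what changed: B drops A's auxiliary set entirely: it sorts each sublist once and decides duplicate-freeness by a single adjacent-equality scan of the sorted list, appending that sorted list directly, instead of A's build-set/compare-lengths/sort-the-set pipeline over indices.
import Mathlib
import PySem

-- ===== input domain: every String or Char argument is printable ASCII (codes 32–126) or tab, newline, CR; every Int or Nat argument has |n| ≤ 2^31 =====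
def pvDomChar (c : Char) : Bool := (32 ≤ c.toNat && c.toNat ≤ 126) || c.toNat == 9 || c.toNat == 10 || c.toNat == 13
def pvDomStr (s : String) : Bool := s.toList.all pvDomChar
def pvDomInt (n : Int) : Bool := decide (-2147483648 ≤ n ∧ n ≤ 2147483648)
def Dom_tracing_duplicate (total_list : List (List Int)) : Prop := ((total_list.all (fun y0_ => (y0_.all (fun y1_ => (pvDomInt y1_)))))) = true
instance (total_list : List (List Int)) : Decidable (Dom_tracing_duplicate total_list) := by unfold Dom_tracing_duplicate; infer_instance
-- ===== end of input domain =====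

-- B replaces A's set-based distinctness test (len(set(x)) == len(x), then sort the set)
-- with a single sort of each sublist followed by an adjacent-equality scan; objective: alternative.


-- ===== PORT A =====
-- for i in range(length): conv = sorted(set(total_list[i])); keep if len(conv) == len(total_list[i])
def tracing_duplicate (total_list : List (List Int)) : List (List Int) :=
  (PySem.List.pyRange 0 total_list.length 1).foldl (fun new_list i =>
    let nested := PySem.List.pyGetD total_list i []
    let conv := PySem.List.sorted (PySem.Set.ofList nested) (fun x => x) false
    if conv.length == nested.length then new_list ++ [conv] else new_list) []

-- ===== PORT B =====
-- _has_adjacent_dup: recursive adjacent-equality scan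
def hasAdjDup : List Int → Bool
  | [] => false
  | [_] => false
  | a :: b :: t => if a == b then true else hasAdjDup (b :: t)

def tracing_duplicate_alt (total_list : List (List Int)) : List (List Int) :=
  total_list.foldl (fun result sub =>
    let s := PySem.List.sorted sub (fun x => x) false
    if hasAdjDup s then result else result ++ [s]) []

-- ===== PRECONDITION & SPEC =====
def Spec_tracing_duplicate (total_list : List (List Int)) (out : List (List Int)) : Prop := out = tracing_duplicate_alt total_list
instance (total_list : List (List Int)) (out : List (List Int)) : Decidable (Spec_tracing_duplicate total_list out) := by unfold Spec_tracing_duplicate; infer_instance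

-- ===== CLAIM (what is proved, stated in full; the proofs are below) =====
def Claim_equal_tracing_duplicate : Prop := ∀ (total_list : List (List Int)), Dom_tracing_duplicate total_list → Spec_tracing_duplicate total_list (tracing_duplicate total_list)

-- ===== LEMMAS AND PROOFS =====

-- foldl Set.add over a list whose combined contents are duplicate-free appends the list unchanged
theorem foldl_add_of_nodup (xs s : List Int) (h : (s ++ xs).Nodup) :
    List.foldl PySem.Set.add s xs = s ++ xs := by
  induction xs generalizing s with
  | nil => simp
  | cons a t ih =>
    have ha : a ∉ s := by
      intro hmem
      have := List.Nodup.disjoint h (a := a) hmem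
      simp at this
    have hadd : PySem.Set.add s a = s ++ [a] := by
      simp [PySem.Set.add, PySem.Set.contains]
      intro hc
      exact absurd hc ha
    have h' : ((s ++ [a]) ++ t).Nodup := by simpa using h
    calc List.foldl PySem.Set.add s (a :: t)
        = List.foldl PySem.Set.add (s ++ [a]) t := by simp [List.foldl, hadd]
      _ = (s ++ [a]) ++ t := ih (s ++ [a]) h'
      _ = s ++ a :: t := by simp

theorem ofList_eq_self_of_nodup (xs : List Int) (h : xs.Nodup) :
    PySem.Set.ofList xs = xs := by
  have := foldl_add_of_nodup xs [] (by simpa using h)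
  simpa [PySem.Set.ofList_eq_foldl] using this

-- foldl Set.add produces s ++ (a sublist of xs)
theorem foldl_add_sublist (xs s : List Int) :
    ∃ t, t.Sublist xs ∧ List.foldl PySem.Set.add s xs = s ++ t := by
  induction xs generalizing s with
  | nil => exact ⟨[], by simp, by simp⟩
  | cons a t ih =>
    by_cases hc : a ∈ s
    · obtain ⟨u, hu, he⟩ := ih s
      refine ⟨u, hu.cons a, ?_⟩
      simpa [List.foldl, PySem.Set.add, PySem.Set.contains, hc] using he
    · obtain ⟨u, hu, he⟩ := ih (s ++ [a])
      refine ⟨a :: u, hu.cons₂ a, ?_⟩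
      simp [List.foldl, PySem.Set.add, PySem.Set.contains, hc]
      simpa using he

theorem ofList_length_eq_iff_nodup (xs : List Int) :
    (PySem.Set.ofList xs).length = xs.length ↔ xs.Nodup := by
  constructor
  · intro hlen
    obtain ⟨t, ht, he⟩ := foldl_add_sublist xs []
    have he' : PySem.Set.ofList xs = t := by simpa [PySem.Set.ofList_eq_foldl] using he
    have : t = xs := ht.eq_of_length (by rw [← he', hlen])
    rw [← this, ← he']
    exact PySem.Set.nodup_ofList xs
  · intro h
    rw [ofList_eq_self_of_nodup xs h]

-- on a ≤-sorted list, no adjacent equal pair ↔ no duplicates at all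
theorem hasAdjDup_false_iff_nodup (l : List Int) (hp : l.Pairwise (· ≤ ·)) :
    hasAdjDup l = false ↔ l.Nodup := by
  induction l with
  | nil => simp [hasAdjDup]
  | cons a t ih =>
    cases t with
    | nil => simp [hasAdjDup]
    | cons b u =>
      have hab : a ≤ b := (List.pairwise_cons.1 hp).1 b (by simp)
      have hale : ∀ y ∈ b :: u, a ≤ y := (List.pairwise_cons.1 hp).1
      have hp' : (b :: u).Pairwise (· ≤ ·) := (List.pairwise_cons.1 hp).2
      have hble : ∀ y ∈ u, b ≤ y := (List.pairwise_cons.1 hp').1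
      constructor
      · intro h
        simp only [hasAdjDup] at h
        split_ifs at h with hq
        have hne : a ≠ b := by simpa using hq
        have hrest : (b :: u).Nodup := (ih hp').1 h
        refine List.nodup_cons.2 ⟨?_, hrest⟩
        intro hmem
        rcases List.mem_cons.1 hmem with h1 | h2
        · exact hne h1
        · exact hne (le_antisymm hab (hble a h2))
      · intro h
        have hna : a ∉ b :: u := (List.nodup_cons.1 h).1
        have hne : a ≠ b := fun he => hna (by simp [he])
        have hrest := (ih hp').2 (List.nodup_cons.1 h).2
        simp [hasAdjDup, hne, hrest]

-- A's step function equals B's step function on every accumulator and sublist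
theorem step_eq (acc : List (List Int)) (sub : List Int) :
    (let conv := PySem.List.sorted (PySem.Set.ofList sub) (fun x => x) false
     if conv.length == sub.length then acc ++ [conv] else acc) =
    (let s := PySem.List.sorted sub (fun x => x) false
     if hasAdjDup s then acc else acc ++ [s]) := by
  have hlen : (PySem.List.sorted (PySem.Set.ofList sub) (fun x => x) false).length
      = (PySem.Set.ofList sub).length := PySem.List.length_sorted _ _ _
  have hperm : (PySem.List.sorted sub (fun x => x) false).Perm sub :=
    PySem.List.sorted_perm sub _ _
  have hpair : (PySem.List.sorted sub (fun x => x) false).Pairwise (· ≤ ·) :=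
    PySem.List.sorted_pairwise sub _
  have hiff : hasAdjDup (PySem.List.sorted sub (fun x => x) false) = false ↔ sub.Nodup := by
    rw [hasAdjDup_false_iff_nodup _ hpair]
    exact hperm.nodup_iff
  by_cases hnd : sub.Nodup
  · have h1 : PySem.Set.ofList sub = sub := ofList_eq_self_of_nodup sub hnd
    have h2 : hasAdjDup (PySem.List.sorted sub (fun x => x) false) = false := hiff.2 hnd
    simp only [h1, h2]
    simp
  · have h1 : (PySem.Set.ofList sub).length ≠ sub.length := fun he =>
      hnd ((ofList_length_eq_iff_nodup sub).1 he)
    have h2 : hasAdjDup (PySem.List.sorted sub (fun x => x) false) = true := by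
      cases hv : hasAdjDup (PySem.List.sorted sub (fun x => x) false)
      · exact absurd (hiff.1 hv) hnd
      · rfl
    simp only [hlen, h2]
    simp [h1]

-- ===== VERDICT (by name: the statement is the Claim_ definition above) =====
theorem tracing_duplicate_spec : Claim_equal_tracing_duplicate := by
  intro total_list _
  unfold Spec_tracing_duplicate tracing_duplicate tracing_duplicate_alt
  rw [PySem.List.foldl_pyRange_zero_pyGetD' total_list []
    (fun new_list nested =>
      let conv := PySem.List.sorted (PySem.Set.ofList nested) (fun x => x) false
      if conv.length == nested.length then new_list ++ [conv] else new_list) []]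
  exact congrFun (congrFun (congrArg _ (funext fun acc => funext fun sub => step_eq acc sub)) _) _
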